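-- pv_equiv track=rewrite | github.com/U17Leetha/LetMeASC | letmeasc/firmware.py | _filter_ranked
-- ===== SOURCE A (Python) =====
-- from collections import Counter
--
-- def _filter_ranked(counter: Counter[str]) -> list[str]:
--     filtered: list[tuple[str, int]] = []
--     for value, score in counter.items():
--         if len(value) < 1 or len(value) > 64:
--             continue
--         if value.isspace():
--             continue
--         if value.lower().startswith(("http://", "https://", "/dev/")):
--             continue
--         filtered.append((value, score))
--
--     filtered.sort(key=lambda item: (-item[1], item[0]))
--     seen: set[str] = set()
--     result: list[str] = []
--     for value, _score in filtered:
--         key = value.lower()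
--         if key in seen:
--             continue
--         seen.add(key)
--         result.append(value)
--     return result
-- ===== SOURCE B (Python) =====
-- def _filter_ranked(counter):
--     # Dedup by lowercased key during the filter pass (keep the best (value, score)
--     # per key: higher score, then lexicographically smaller value), sort once at the end.
--     best = {}
--     for value, score in counter.items():
--         if not (1 <= len(value) <= 64) or value.isspace():
--             continue
--         low = value.lower()
--         if low.startswith(("http://", "https://", "/dev/")):
--             continue
--         cur = best.get(low)
--         if cur is None or score > cur[1] or (score == cur[1] and value < cur[0]):
--             best[low] = (value, score)
--     ranked = sorted(best.values(), key=lambda t: (-t[1], t[0]))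
--     return [value for value, _score in ranked]
-- ===== Notes on version B (the rewrite author's own statement) =====
-- stated objective: alternative
-- what changed: B dedups during the single filter pass with a dict mapping each lowercased value to the best (value, score) pair (higher score, then lexicographically smaller value) and sorts only the per-key winners once, instead of A's sort of the whole filtered list followed by a seen-set dedup scan.
import Mathlib
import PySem

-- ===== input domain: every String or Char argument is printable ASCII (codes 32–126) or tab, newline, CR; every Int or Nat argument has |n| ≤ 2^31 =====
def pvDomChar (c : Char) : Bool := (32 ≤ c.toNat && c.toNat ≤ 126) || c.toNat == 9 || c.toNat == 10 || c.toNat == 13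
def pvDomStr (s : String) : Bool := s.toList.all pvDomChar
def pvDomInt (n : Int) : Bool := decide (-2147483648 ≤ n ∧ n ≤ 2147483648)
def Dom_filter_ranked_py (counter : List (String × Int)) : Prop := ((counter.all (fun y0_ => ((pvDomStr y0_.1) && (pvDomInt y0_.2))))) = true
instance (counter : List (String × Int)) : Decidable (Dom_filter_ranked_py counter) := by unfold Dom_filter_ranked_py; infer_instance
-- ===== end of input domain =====

-- B dedups by lowercased key in a dict during the filter pass and sorts once at the end,
-- instead of sorting the whole filtered list and deduping with a seen-set (objective: alternative).

-- ===== PORT A =====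
-- 'value.lower().startswith(("http://", "https://", "/dev/"))' is ported as the disjunction
-- of the three startswith tests (exactly Python's tuple-startswith semantics).
def filter_ranked_py (counter : List (String × Int)) : List String :=
  let filtered : List (String × Int) :=
    counter.foldl (fun filtered vs =>
      let value := vs.1
      let score := vs.2
      if PySem.Str.len value < 1 ∨ PySem.Str.len value > 64 then filtered
      else if PySem.Str.strIsspace value then filtered
      else if PySem.Str.startswith (PySem.Str.lower value) "http://" ||
              PySem.Str.startswith (PySem.Str.lower value) "https://" ||
              PySem.Str.startswith (PySem.Str.lower value) "/dev/" then filtered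
      else filtered ++ [(value, score)]) []
  let sortedF := PySem.List.sorted2 filtered (fun item => -item.2) (fun item => item.1)
  let fin :=
    sortedF.foldl (fun (st : PySem.Set String × List String) vs =>
      let key := PySem.Str.lower vs.1
      if st.1.contains key then st
      else (st.1.add key, st.2 ++ [vs.1])) (PySem.Set.ofList [], [])
  fin.2

-- ===== PORT B =====
def filter_ranked_py_alt (counter : List (String × Int)) : List String :=
  let best : PySem.Dict String (String × Int) :=
    counter.foldl (fun best vs =>
      let value := vs.1
      let score := vs.2
      if ¬(1 ≤ PySem.Str.len value ∧ PySem.Str.len value ≤ 64) ∨ PySem.Str.strIsspace value then best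
      else
        let low := PySem.Str.lower value
        if PySem.Str.startswith low "http://" ||
           PySem.Str.startswith low "https://" ||
           PySem.Str.startswith low "/dev/" then best
        else
          match best.get? low with
          | none => best.insert low (value, score)
          | some cur =>
            if score > cur.2 ∨ (score = cur.2 ∧ value < cur.1) then best.insert low (value, score)
            else best) PySem.Dict.empty
  let ranked := PySem.List.sorted2 best.values (fun t => -t.2) (fun t => t.1)
  ranked.map (fun t => t.1)

-- ===== PRECONDITION & SPEC =====
def Spec_filter_ranked_py (counter : List (String × Int)) (out : List String) : Prop := out = filter_ranked_py_alt counter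
instance (counter : List (String × Int)) (out : List String) : Decidable (Spec_filter_ranked_py counter out) := by unfold Spec_filter_ranked_py; infer_instance

-- ===== CLAIM (what is proved, stated in full; the proofs are below) =====
def Claim_equal_filter_ranked_py : Prop := ∀ (counter : List (String × Int)), Dom_filter_ranked_py counter → Spec_filter_ranked_py counter (filter_ranked_py counter)

-- ===== LEMMAS AND PROOFS =====

-- the common filter predicate
def pvKeep (value : String) : Bool :=
  !(decide (PySem.Str.len value < 1 ∨ PySem.Str.len value > 64)) &&
  !(PySem.Str.strIsspace value) &&
  !(PySem.Str.startswith (PySem.Str.lower value) "http://" ||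
    PySem.Str.startswith (PySem.Str.lower value) "https://" ||
    PySem.Str.startswith (PySem.Str.lower value) "/dev/")

def pvCls (x : String × Int) : String := PySem.Str.lower x.1

def pvKey (x : String × Int) : Lex (Int × String) := toLex (-x.2, x.1)

def pvF (counter : List (String × Int)) : List (String × Int) := counter.filter (fun vs => pvKeep vs.1)

-- the dict update B performs on an element that passed the filter
def pvMinStep (d : PySem.Dict String (String × Int)) (vs : String × Int) : PySem.Dict String (String × Int) :=
  match d.get? (pvCls vs) with
  | none => d.insert (pvCls vs) (vs.1, vs.2)
  | some cur => if vs.2 > cur.2 ∨ (vs.2 = cur.2 ∧ vs.1 < cur.1) then d.insert (pvCls vs) (vs.1, vs.2) else d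

-- first element of each lowercase class, in list order (A's dedup loop)
def pvRep (seen : PySem.Set String) : List (String × Int) → List (String × Int)
  | [] => []
  | x :: S => if seen.contains (pvCls x) then pvRep seen S else x :: pvRep (seen.add (pvCls x)) S

-- a is a minimal-key element of its lowercase class in xs
def pvIsRep (xs : List (String × Int)) (a : String × Int) : Prop :=
  a ∈ xs ∧ ∀ y ∈ xs, pvCls y = pvCls a → pvKey a ≤ pvKey y

theorem pvKey_inj : Function.Injective pvKey := by
  intro a b h
  simp only [pvKey] at h
  have h' : ((-a.2, a.1) : Int × String) = (-b.2, b.1) := by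
    simpa using congrArg ofLex h
  obtain ⟨h1, h2⟩ := Prod.ext_iff.1 h'
  exact Prod.ext_iff.2 ⟨h2, by omega⟩

theorem pvCond_iff (x cur : String × Int) :
    (x.2 > cur.2 ∨ (x.2 = cur.2 ∧ x.1 < cur.1)) ↔ pvKey x < pvKey cur := by
  simp only [pvKey, Prod.Lex.toLex_lt_toLex]
  constructor
  · rintro (h | ⟨h1, h2⟩)
    · exact Or.inl (by omega)
    · exact Or.inr ⟨by omega, h2⟩
  · rintro (h | ⟨h1, h2⟩)
    · exact Or.inl (by omega)
    · exact Or.inr ⟨by omega, h2⟩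

theorem pvSorted2_eq (xs : List (String × Int)) :
    PySem.List.sorted2 xs (fun t => -t.2) (fun t => t.1) = PySem.List.sorted xs pvKey := by
  have hb : (fun (a b : String × Int) => decide ((-a.2 : Int) < -b.2) || (!decide ((-b.2 : Int) < -a.2) && decide (a.1 < b.1))) = (fun a b => decide (pvKey a < pvKey b)) := by
    funext a b
    simp only [pvKey, Prod.Lex.toLex_lt_toLex]
    by_cases h1 : (-a.2 : Int) < -b.2 <;> by_cases h2 : (-b.2 : Int) < -a.2 <;> by_cases h3 : a.1 < b.1 <;>
      simp [h1, h2, h3] <;> omega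
  simp only [PySem.List.sorted2, PySem.List.sorted, Bool.false_eq_true, ite_false]
  rw [hb]

theorem pvA_filtered (counter : List (String × Int)) (acc : List (String × Int)) :
    counter.foldl (fun filtered vs =>
      let value := vs.1
      let score := vs.2
      if PySem.Str.len value < 1 ∨ PySem.Str.len value > 64 then filtered
      else if PySem.Str.strIsspace value then filtered
      else if PySem.Str.startswith (PySem.Str.lower value) "http://" ||
              PySem.Str.startswith (PySem.Str.lower value) "https://" ||
              PySem.Str.startswith (PySem.Str.lower value) "/dev/" then filtered
      else filtered ++ [(value, score)]) acc = acc ++ pvF counter := by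
  induction counter generalizing acc with
  | nil => simp [pvF]
  | cons x xs ih =>
    simp only [List.foldl_cons]
    rw [ih]
    show (if PySem.Str.len x.1 < 1 ∨ PySem.Str.len x.1 > 64 then acc
      else if PySem.Str.strIsspace x.1 then acc
      else if PySem.Str.startswith (PySem.Str.lower x.1) "http://" ||
              PySem.Str.startswith (PySem.Str.lower x.1) "https://" ||
              PySem.Str.startswith (PySem.Str.lower x.1) "/dev/" then acc
      else acc ++ [(x.1, x.2)]) ++ pvF xs = acc ++ pvF (x :: xs)
    split_ifs with h1 h2 h3
    · have hk : pvKeep x.1 = false := by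
        simp only [pvKeep, h1, decide_true, Bool.not_true, Bool.false_and]
      simp only [pvF, List.filter_cons, hk, Bool.false_eq_true, if_false]
    · have hk : pvKeep x.1 = false := by
        simp only [pvKeep, h2, Bool.not_true, Bool.false_and, Bool.and_false]
      simp only [pvF, List.filter_cons, hk, Bool.false_eq_true, if_false]
    · have hk : pvKeep x.1 = false := by
        simp only [pvKeep, h3, Bool.not_true, Bool.and_false]
      simp only [pvF, List.filter_cons, hk, Bool.false_eq_true, if_false]
    · have hk : pvKeep x.1 = true := by
        simp only [pvKeep, Bool.and_eq_true, Bool.not_eq_true', decide_eq_false_iff_not]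
        refine ⟨⟨h1, ?_⟩, ?_⟩
        · simpa using h2
        · simpa using h3
      simp only [pvF, List.filter_cons, hk, if_true]
      simp

theorem pvA_dedup (S : List (String × Int)) (seen : PySem.Set String) (acc : List String) :
    (S.foldl (fun (st : PySem.Set String × List String) vs =>
      let key := PySem.Str.lower vs.1
      if st.1.contains key then st
      else (st.1.add key, st.2 ++ [vs.1])) (seen, acc)).2 = acc ++ (pvRep seen S).map (fun t => t.1) := by
  induction S generalizing seen acc with
  | nil => simp [pvRep]
  | cons x S ih =>
    by_cases hc : seen.contains (pvCls x) = true
    · simp only [List.foldl_cons, pvRep, pvCls] at *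
      rw [if_pos hc, if_pos hc, ih]
    · simp only [List.foldl_cons, pvRep, pvCls] at *
      rw [if_neg hc, if_neg hc, ih]
      simp

theorem pvB_fold (counter : List (String × Int)) (d : PySem.Dict String (String × Int)) :
    counter.foldl (fun best vs =>
      let value := vs.1
      let score := vs.2
      if ¬(1 ≤ PySem.Str.len value ∧ PySem.Str.len value ≤ 64) ∨ PySem.Str.strIsspace value then best
      else
        let low := PySem.Str.lower value
        if PySem.Str.startswith low "http://" ||
           PySem.Str.startswith low "https://" ||
           PySem.Str.startswith low "/dev/" then best
        else
          match best.get? low with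
          | none => best.insert low (value, score)
          | some cur =>
            if score > cur.2 ∨ (score = cur.2 ∧ value < cur.1) then best.insert low (value, score)
            else best) d = (pvF counter).foldl pvMinStep d := by
  induction counter generalizing d with
  | nil => simp [pvF]
  | cons x xs ih =>
    simp only [List.foldl_cons, pvF, List.filter_cons]
    by_cases h1 : ¬(1 ≤ PySem.Str.len x.1 ∧ PySem.Str.len x.1 ≤ 64) ∨ PySem.Str.strIsspace x.1 = true
    · have hk : pvKeep x.1 = false := by
        rcases h1 with h | h
        · simp only [pvKeep, decide_eq_true (show PySem.Str.len x.1 < 1 ∨ PySem.Str.len x.1 > 64 by omega),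
            Bool.not_true, Bool.false_and]
        · simp only [pvKeep, h, Bool.not_true, Bool.false_and, Bool.and_false]
      rw [if_pos h1, ih, hk]
      simp [pvF]
    · by_cases h3 : (PySem.Str.startswith (PySem.Str.lower x.1) "http://" ||
           PySem.Str.startswith (PySem.Str.lower x.1) "https://" ||
           PySem.Str.startswith (PySem.Str.lower x.1) "/dev/") = true
      · have hk : pvKeep x.1 = false := by
          simp only [pvKeep, h3, Bool.not_true, Bool.and_false]
        rw [if_neg h1, if_pos h3, ih, hk]
        simp [pvF]
      · have hk : pvKeep x.1 = true := by
          push Not at h1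
          simp only [pvKeep, Bool.and_eq_true, Bool.not_eq_true', decide_eq_false_iff_not]
          refine ⟨⟨?_, ?_⟩, by simpa using h3⟩
          · have := h1.1
            omega
          · simpa using h1.2
        rw [if_neg h1, if_neg h3, ih, hk]
        simp only [if_true]
        rfl

-- characterisation of the dict built by B's loop
theorem pvMin_spec (xs : List (String × Int)) :
    (xs.foldl pvMinStep PySem.Dict.empty).keys.Nodup ∧
    (∀ k a, (xs.foldl pvMinStep PySem.Dict.empty).get? k = some a → (pvCls a = k ∧ pvIsRep xs a)) ∧
    (∀ k, (xs.foldl pvMinStep PySem.Dict.empty).get? k = none → ∀ y ∈ xs, pvCls y ≠ k) := by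
  induction xs using List.reverseRecOn with
  | nil =>
    refine ⟨by simp [PySem.Dict.keys_empty], ?_, ?_⟩
    · intro k a ha; rw [List.foldl_nil, PySem.Dict.get?_empty] at ha; cases ha
    · intro k _ y hy; cases hy
  | append_singleton xs x ih =>
    obtain ⟨hnd, hsome, hnone⟩ := ih
    rw [List.foldl_concat]
    cases hg : (xs.foldl pvMinStep PySem.Dict.empty).get? (pvCls x) with
    | none =>
      have hstep : pvMinStep (xs.foldl pvMinStep PySem.Dict.empty) x
          = (xs.foldl pvMinStep PySem.Dict.empty).insert (pvCls x) (x.1, x.2) := by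
        simp only [pvMinStep, hg]
      rw [hstep]
      refine ⟨PySem.Dict.nodup_keys_insert _ _ _ hnd, ?_, ?_⟩
      · intro k a ha
        rw [PySem.Dict.get?_insert] at ha
        by_cases hk : k = pvCls x
        · rw [if_pos hk] at ha
          have hax : a = x := (Option.some.inj ha).symm
          refine ⟨hax ▸ hk.symm, List.mem_append_right _ (by simp [hax]), ?_⟩
          intro y hy hcy
          rcases List.mem_append.1 hy with hy | hy
          · exact (hnone (pvCls x) hg y hy (by rw [hcy, hax])).elim
          · simp at hy; rw [hy, hax]
        · rw [if_neg hk] at ha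
          obtain ⟨hc, hmem, hmin⟩ := hsome k a ha
          refine ⟨hc, List.mem_append_left _ hmem, ?_⟩
          intro y hy hcy
          rcases List.mem_append.1 hy with hy | hy
          · exact hmin y hy hcy
          · simp at hy; rw [hy] at hcy; exact (hk ((hcy.trans hc).symm)).elim
      · intro k hk y hy
        rw [PySem.Dict.get?_insert] at hk
        by_cases hkk : k = pvCls x
        · rw [if_pos hkk] at hk; cases hk
        · rw [if_neg hkk] at hk
          rcases List.mem_append.1 hy with hy | hy
          · exact hnone k hk y hy
          · simp at hy; rw [hy]; exact fun h => hkk (h ▸ rfl)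
    | some cur =>
      obtain ⟨hccur, hcurmem, hcurmin⟩ := hsome _ _ hg
      by_cases hcond : x.2 > cur.2 ∨ (x.2 = cur.2 ∧ x.1 < cur.1)
      · have hstep : pvMinStep (xs.foldl pvMinStep PySem.Dict.empty) x
            = (xs.foldl pvMinStep PySem.Dict.empty).insert (pvCls x) (x.1, x.2) := by
          simp only [pvMinStep, hg, if_pos hcond]
        rw [hstep]
        have hlt : pvKey x < pvKey cur := (pvCond_iff x cur).1 hcond
        refine ⟨PySem.Dict.nodup_keys_insert _ _ _ hnd, ?_, ?_⟩
        · intro k a ha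
          rw [PySem.Dict.get?_insert] at ha
          by_cases hk : k = pvCls x
          · rw [if_pos hk] at ha
            have hax : a = x := (Option.some.inj ha).symm
            refine ⟨hax ▸ hk.symm, List.mem_append_right _ (by simp [hax]), ?_⟩
            intro y hy hcy
            rcases List.mem_append.1 hy with hy | hy
            · have h1 : pvKey cur ≤ pvKey y := hcurmin y hy (by rw [hcy, hax, ← hccur])
              rw [hax]; exact le_of_lt (lt_of_lt_of_le hlt h1)
            · simp at hy; rw [hy, hax]
          · rw [if_neg hk] at ha
            obtain ⟨hc, hmem, hmin⟩ := hsome k a ha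
            refine ⟨hc, List.mem_append_left _ hmem, ?_⟩
            intro y hy hcy
            rcases List.mem_append.1 hy with hy | hy
            · exact hmin y hy hcy
            · simp at hy; rw [hy] at hcy; exact (hk ((hcy.trans hc).symm)).elim
        · intro k hk y hy
          rw [PySem.Dict.get?_insert] at hk
          by_cases hkk : k = pvCls x
          · rw [if_pos hkk] at hk; cases hk
          · rw [if_neg hkk] at hk
            rcases List.mem_append.1 hy with hy | hy
            · exact hnone k hk y hy
            · simp at hy; rw [hy]; exact fun h => hkk (h ▸ rfl)
      · have hstep : pvMinStep (xs.foldl pvMinStep PySem.Dict.empty) x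
            = xs.foldl pvMinStep PySem.Dict.empty := by
          simp only [pvMinStep, hg, if_neg hcond]
        rw [hstep]
        have hge : pvKey cur ≤ pvKey x := le_of_not_gt (fun h => hcond ((pvCond_iff x cur).2 h))
        refine ⟨hnd, ?_, ?_⟩
        · intro k a ha
          obtain ⟨hc, hmem, hmin⟩ := hsome k a ha
          refine ⟨hc, List.mem_append_left _ hmem, ?_⟩
          intro y hy hcy
          rcases List.mem_append.1 hy with hy | hy
          · exact hmin y hy hcy
          · simp at hy; rw [hy] at hcy
            have hk2 : k = pvCls x := (hcy.trans hc).symm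
            have hac : a = cur := by
              rw [hk2, hg] at ha; exact (Option.some.inj ha).symm
            rw [hy, hac]; exact hge
        · intro k hk y hy
          rcases List.mem_append.1 hy with hy | hy
          · exact hnone k hk y hy
          · simp at hy; rw [hy]
            intro h; rw [← h, hg] at hk; cases hk

theorem pvMem_values (xs : List (String × Int)) (a : String × Int) :
    a ∈ (xs.foldl pvMinStep PySem.Dict.empty).values ↔ pvIsRep xs a := by
  obtain ⟨hnd, hsome, hnone⟩ := pvMin_spec xs
  constructor
  · intro h
    simp only [PySem.Dict.values, List.mem_map] at h
    obtain ⟨⟨k, b⟩, hmem, hb⟩ := h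
    cases hb
    exact (hsome k _ (PySem.Dict.get?_of_mem_items _ hmem hnd)).2
  · intro hrep
    cases hg : (xs.foldl pvMinStep PySem.Dict.empty).get? (pvCls a) with
    | none => exact (hnone _ hg a hrep.1 rfl).elim
    | some b =>
      obtain ⟨hcb, hbmem, hbmin⟩ := hsome _ _ hg
      have hab : a = b :=
        pvKey_inj (le_antisymm (hrep.2 b hbmem hcb) (hbmin a hrep.1 hcb.symm))
      have hitem := PySem.Dict.mem_items_of_get?_eq_some _ hg
      simp only [PySem.Dict.values, List.mem_map]
      exact ⟨(pvCls a, b), hitem, hab.symm⟩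

theorem pvValues_nodup (xs : List (String × Int)) :
    (xs.foldl pvMinStep PySem.Dict.empty).values.Nodup := by
  obtain ⟨hnd, hsome, hnone⟩ := pvMin_spec xs
  have hitems : (xs.foldl pvMinStep PySem.Dict.empty).items.Nodup := hnd.of_map _
  refine List.Nodup.map_on ?_ hitems
  rintro ⟨k1, v1⟩ h1 ⟨k2, v2⟩ h2 hv
  cases hv
  have e1 := (hsome k1 _ (PySem.Dict.get?_of_mem_items _ h1 hnd)).1
  have e2 := (hsome k2 _ (PySem.Dict.get?_of_mem_items _ h2 hnd)).1
  exact Prod.ext_iff.2 ⟨e1.symm.trans e2, rfl⟩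

theorem pvRep_sublist (seen : PySem.Set String) (S : List (String × Int)) :
    (pvRep seen S).Sublist S := by
  induction S generalizing seen with
  | nil => simp [pvRep]
  | cons x S ih =>
    rw [pvRep]
    split_ifs
    · exact (ih seen).cons x
    · exact (ih (seen.add (pvCls x))).cons₂ x

theorem pvRep_mem_not_seen (seen : PySem.Set String) (S : List (String × Int)) (a : String × Int)
    (h : a ∈ pvRep seen S) : pvCls a ∉ seen := by
  induction S generalizing seen with
  | nil => simp [pvRep] at h
  | cons x S ih =>
    rw [pvRep] at h
    split_ifs at h with hc
    · exact ih seen h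
    · rcases List.mem_cons.1 h with rfl | h
      · intro hmem
        exact absurd ((PySem.Set.contains_iff seen (pvCls a)).2 hmem) (by simpa using hc)
      · intro hmem
        exact ih (seen.add (pvCls x)) h ((PySem.Set.mem_add seen (pvCls x) (pvCls a)).2 (Or.inl hmem))

theorem pvRep_cls_nodup (seen : PySem.Set String) (S : List (String × Int)) :
    ((pvRep seen S).map pvCls).Nodup := by
  induction S generalizing seen with
  | nil => simp [pvRep]
  | cons x S ih =>
    rw [pvRep]
    split_ifs with hc
    · exact ih seen
    · simp only [List.map_cons, List.nodup_cons]
      refine ⟨?_, ih (seen.add (pvCls x))⟩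
      intro hmem
      obtain ⟨b, hb, hcb⟩ := List.mem_map.1 hmem
      have := pvRep_mem_not_seen _ _ _ hb
      exact this ((PySem.Set.mem_add seen (pvCls x) (pvCls b)).2 (Or.inr hcb))

theorem pvRep_mem (S : List (String × Int)) (hp : S.Pairwise (fun a b => pvKey a ≤ pvKey b))
    (seen : PySem.Set String) (a : String × Int) :
    a ∈ pvRep seen S ↔ (pvCls a ∉ seen ∧ pvIsRep S a) := by
  induction S generalizing seen with
  | nil => simp [pvRep, pvIsRep]
  | cons x S ih =>
    have hp' := List.pairwise_cons.1 hp
    rw [pvRep]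
    split_ifs with hc
    · rw [ih hp'.2 seen]
      constructor
      · rintro ⟨hns, hmem, hmin⟩
        refine ⟨hns, List.mem_cons_of_mem x hmem, ?_⟩
        intro y hy hcy
        rcases List.mem_cons.1 hy with rfl | hy
        · -- y = x : cls x ∈ seen but cls a ∉ seen, contradiction with hcy
          exact (hns ((PySem.Set.contains_iff seen (pvCls a)).1 (hcy ▸ hc))).elim
        · exact hmin y hy hcy
      · rintro ⟨hns, hmem, hmin⟩
        have hax : a ≠ x := by
          rintro rfl
          exact hns ((PySem.Set.contains_iff seen (pvCls a)).1 hc)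
        refine ⟨hns, (List.mem_cons.1 hmem).resolve_left hax, ?_⟩
        intro y hy hcy
        exact hmin y (List.mem_cons_of_mem x hy) hcy
    · constructor
      · intro h
        rcases List.mem_cons.1 h with rfl | h
        · refine ⟨by simpa using hc, List.mem_cons_self, ?_⟩
          intro y hy hcy
          rcases List.mem_cons.1 hy with rfl | hy
          · exact le_refl _
          · exact hp'.1 y hy
        · rw [ih hp'.2 (seen.add (pvCls x))] at h
          obtain ⟨hns, hmem, hmin⟩ := h
          have hne : pvCls a ≠ pvCls x := fun hh =>
            hns ((PySem.Set.mem_add seen (pvCls x) (pvCls a)).2 (Or.inr hh))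
          refine ⟨fun hh => hns ((PySem.Set.mem_add seen (pvCls x) (pvCls a)).2 (Or.inl hh)),
            List.mem_cons_of_mem x hmem, ?_⟩
          intro y hy hcy
          rcases List.mem_cons.1 hy with rfl | hy
          · exact (hne hcy.symm).elim
          · exact hmin y hy hcy
      · rintro ⟨hns, hmem, hmin⟩
        by_cases hax : pvCls a = pvCls x
        · -- a and x in the same class: a = x since both minimal / x first with key ≤
          have hmemx : a = x := by
            rcases List.mem_cons.1 hmem with rfl | hmem'
            · rfl
            · have h1 : pvKey a ≤ pvKey x := hmin x List.mem_cons_self hax.symm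
              have h2 : pvKey x ≤ pvKey a := hp'.1 a hmem'
              exact pvKey_inj (le_antisymm h1 h2)
          exact hmemx ▸ List.mem_cons_self
        · have hmem' : a ∈ S := by
            rcases List.mem_cons.1 hmem with rfl | h
            · exact (hax rfl).elim
            · exact h
          refine List.mem_cons_of_mem x ((ih hp'.2 (seen.add (pvCls x))).2 ⟨?_, hmem', ?_⟩)
          · intro hh
            rcases (PySem.Set.mem_add seen (pvCls x) (pvCls a)).1 hh with hh | hh
            · exact hns hh
            · exact hax hh
          · intro y hy hcy
            exact hmin y (List.mem_cons_of_mem x hy) hcy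

theorem pvIsRep_perm (S T : List (String × Int)) (h : S.Perm T) (a : String × Int) :
    pvIsRep S a ↔ pvIsRep T a := by
  constructor <;> rintro ⟨h1, h2⟩
  · exact ⟨h.mem_iff.1 h1, fun y hy => h2 y (h.mem_iff.2 hy)⟩
  · exact ⟨h.mem_iff.2 h1, fun y hy => h2 y (h.mem_iff.1 hy)⟩

-- ===== VERDICT (by name: the statement is the Claim_ definition above) =====
theorem filter_ranked_py_spec : Claim_equal_filter_ranked_py := by
  intro counter _
  unfold Spec_filter_ranked_py filter_ranked_py filter_ranked_py_alt
  simp only []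
  rw [pvA_filtered counter [], pvB_fold counter PySem.Dict.empty, List.nil_append,
    pvSorted2_eq, pvSorted2_eq, pvA_dedup]
  rw [List.nil_append]
  have hSperm : (PySem.List.sorted (pvF counter) pvKey).Perm (pvF counter) :=
    PySem.List.sorted_perm (pvF counter) pvKey false
  have hpair : (PySem.List.sorted (pvF counter) pvKey).Pairwise (fun a b => pvKey a ≤ pvKey b) :=
    PySem.List.sorted_pairwise (pvF counter) pvKey
  have hLnodup : (pvRep (PySem.Set.ofList []) (PySem.List.sorted (pvF counter) pvKey)).Nodup :=
    (pvRep_cls_nodup _ _).of_map _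
  have hVnodup := pvValues_nodup (pvF counter)
  suffices h : PySem.List.sorted ((pvF counter).foldl pvMinStep PySem.Dict.empty).values pvKey
      = pvRep (PySem.Set.ofList []) (PySem.List.sorted (pvF counter) pvKey) by
    rw [h]
  apply PySem.List.sorted_eq_of_perm_of_pairwise_lt
  · rw [List.perm_ext_iff_of_nodup hLnodup hVnodup]
    intro a
    rw [pvRep_mem _ hpair _ a, pvMem_values]
    constructor
    · rintro ⟨-, hrep⟩
      exact (pvIsRep_perm _ _ hSperm a).1 hrep
    · intro hrep
      exact ⟨by simp, (pvIsRep_perm _ _ hSperm a).2 hrep⟩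
  · have hle : (pvRep (PySem.Set.ofList []) (PySem.List.sorted (pvF counter) pvKey)).Pairwise
        (fun a b => pvKey a ≤ pvKey b) :=
      List.Pairwise.sublist (pvRep_sublist _ _) hpair
    have hne := List.nodup_iff_pairwise_ne.1 hLnodup
    exact (hle.and hne).imp fun {a b} h => lt_of_le_of_ne h.1 (fun hh => h.2 (pvKey_inj hh))
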